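-- pv_equiv track=rewrite | github.com/weiliansong/blueprint-vectorizer | 03_frame_detect/sem_rings.py | get_neighbor_edges
-- ===== SOURCE A (Python) =====
-- def get_neighbor_edges(instance_ring):
--   # rotate instance ring so we start at a new edge
--   pivot = 0
--   prev_id = instance_ring[0][2]
--   for idx, (_, _, next_id) in enumerate(instance_ring):
--     if next_id != prev_id:
--       pivot = idx
--       break
--   instance_ring = instance_ring[pivot:] + instance_ring[:pivot]
--
--   # now do some stuff
--   new_instance_ring = []
--   prev_id = None
--   edges = []
--
--   for edge, neighbor_sem, neighbor_id in instance_ring: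
--     if prev_id == None:
--       prev_id = neighbor_id
--       edges.append((edge, neighbor_sem, neighbor_id))
--
--     elif prev_id == neighbor_id:
--       edges.append((edge, neighbor_sem, neighbor_id))
--
--     elif prev_id != neighbor_id:
--       new_instance_ring.append(edges)
--       prev_id = neighbor_id
--       edges = [(edge, neighbor_sem, neighbor_id)]
--
--     else:
--       raise Exception
--
--   new_instance_ring.append(edges)
--
--   return new_instance_ring
-- ===== SOURCE B (Python) =====
-- def get_neighbor_edges(instance_ring):
--   # Stage 1: split the ORIGINAL ring into maximal runs of equal neighbor_id
--   # (no element-level rotation).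
--   runs = []
--   for edge, neighbor_sem, neighbor_id in instance_ring:
--     if runs and runs[-1][-1][2] == neighbor_id:
--       runs[-1].append((edge, neighbor_sem, neighbor_id))
--     else:
--       runs.append([(edge, neighbor_sem, neighbor_id)])
--   # Stage 2: rotate at the RUN level: the first run moves to the back,
--   # merging into the last run when the ring wraps around on the same id.
--   if len(runs) == 1:
--     return runs
--   if runs[-1][-1][2] == runs[0][0][2]:
--     return runs[1:-1] + [runs[-1] + runs[0]]
--   return runs[1:] + [runs[0]]
-- ===== Notes on version B (the rewrite author's own statement) =====
-- stated objective: alternative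
-- what changed: A rotates the element list to a pivot and then runs a prev_id/edges state machine over the rotated elements; B never rotates elements: it first splits the original ring into maximal runs of equal neighbor_id, then rotates at the run level, moving the first run behind the last and merging the two when the ring wraps around on the same id.
import Mathlib
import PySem

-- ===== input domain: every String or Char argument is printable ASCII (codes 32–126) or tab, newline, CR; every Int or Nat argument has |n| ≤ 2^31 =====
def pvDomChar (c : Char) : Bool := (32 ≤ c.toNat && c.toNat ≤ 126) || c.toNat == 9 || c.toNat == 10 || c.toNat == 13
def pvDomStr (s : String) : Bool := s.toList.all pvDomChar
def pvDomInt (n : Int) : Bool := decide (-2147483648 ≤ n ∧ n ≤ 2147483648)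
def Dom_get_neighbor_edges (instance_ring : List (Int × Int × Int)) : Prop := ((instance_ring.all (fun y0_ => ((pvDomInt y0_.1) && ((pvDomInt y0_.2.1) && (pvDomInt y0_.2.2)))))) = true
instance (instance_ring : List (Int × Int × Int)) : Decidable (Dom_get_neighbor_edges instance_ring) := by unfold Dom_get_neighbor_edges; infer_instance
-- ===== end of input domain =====

-- B avoids A's element-level rotation: it splits the original ring into maximal
-- runs of equal neighbor_id and then rotates/merges at the run level (alternative).

-- ===== PORT A =====
-- A's pivot loop: first index whose neighbor_id differs from prev (break), else 0
def pvPivotA (prev : Int) : List (Int × Int × Int) → Nat → Nat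
  | [], _ => 0
  | x :: xs, idx => if x.2.2 ≠ prev then idx else pvPivotA prev xs (idx + 1)

-- A's grouping loop over (new_instance_ring, prev_id, edges), then append final edges
def pvLoopA : List (Int × Int × Int) → List (List (Int × Int × Int)) → Option Int →
    List (Int × Int × Int) → List (List (Int × Int × Int))
  | [], acc, _, edges => acc ++ [edges]
  | x :: xs, acc, prev, edges =>
      match prev with
      | none => pvLoopA xs acc (some x.2.2) (edges ++ [x])
      | some p =>
          if p = x.2.2 then pvLoopA xs acc (some p) (edges ++ [x])
          else pvLoopA xs (acc ++ [edges]) (some x.2.2) [x]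

def get_neighbor_edges (instance_ring : List (Int × Int × Int)) : List (List (Int × Int × Int)) :=
  match instance_ring[0]? with
  | none => []  -- unreachable under Pre_ (Python raises IndexError here)
  | some h =>
      let pivot : Nat := pvPivotA h.2.2 instance_ring 0
      let rotated := PySem.List.slice instance_ring (some (pivot : Int)) none ++
                     PySem.List.slice instance_ring none (some (pivot : Int))
      pvLoopA rotated [] none []

-- ===== PORT B =====
-- B's stage-1 loop: append each element to the last run when its neighbor_id
-- matches the last run's last element, else open a new run
def pvRunsLoop : List (Int × Int × Int) → List (List (Int × Int × Int)) → List (List (Int × Int × Int))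
  | [], runs => runs
  | e :: rest, runs =>
      match runs.getLast? with
      | some lastRun =>
          match lastRun.getLast? with
          | some le =>
              if le.2.2 = e.2.2 then pvRunsLoop rest (runs.dropLast ++ [lastRun ++ [e]])
              else pvRunsLoop rest (runs ++ [[e]])
          | none => pvRunsLoop rest (runs ++ [[e]])  -- unreachable: the loop never stores an empty run
      | none => pvRunsLoop rest (runs ++ [[e]])

def get_neighbor_edges_alt (instance_ring : List (Int × Int × Int)) : List (List (Int × Int × Int)) :=
  let runs := pvRunsLoop instance_ring []
  match runs with
  | [] => []  -- unreachable under Pre_ (Python raises IndexError here)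
  | [r] => [r]
  | r0 :: r1 :: rs =>
      let rl := (r1 :: rs).getLast (by simp)
      -- runs[-1][-1][2] == runs[0][0][2]; runs are nonempty, compared via head?/getLast?
      if rl.getLast?.map (·.2.2) = r0.head?.map (·.2.2) then
        (r1 :: rs).dropLast ++ [rl ++ r0]
      else (r1 :: rs) ++ [r0]

-- ===== PRECONDITION & SPEC =====
-- Pre_ excludes exactly the empty list, on which both Pythons raise IndexError.
def Pre_get_neighbor_edges (instance_ring : List (Int × Int × Int)) : Prop :=
  instance_ring ≠ []
instance (instance_ring : List (Int × Int × Int)) : Decidable (Pre_get_neighbor_edges instance_ring) := by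
  unfold Pre_get_neighbor_edges; infer_instance

def pvWitness_get_neighbor_edges : (List (Int × Int × Int)) := [(1, 2, 3), (4, 5, 3), (6, 7, 8)]

def Spec_get_neighbor_edges (instance_ring : List (Int × Int × Int)) (out : List (List (Int × Int × Int))) : Prop := out = get_neighbor_edges_alt instance_ring
instance (instance_ring : List (Int × Int × Int)) (out : List (List (Int × Int × Int))) : Decidable (Spec_get_neighbor_edges instance_ring out) := by unfold Spec_get_neighbor_edges; infer_instance

-- ===== CLAIM (what is proved, stated in full; the proofs are below) =====
def Claim_equal_get_neighbor_edges : Prop := ∀ (instance_ring : List (Int × Int × Int)), Dom_get_neighbor_edges instance_ring → Pre_get_neighbor_edges instance_ring → Spec_get_neighbor_edges instance_ring (get_neighbor_edges instance_ring)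

-- ===== LEMMAS AND PROOFS =====

-- normal form shared by both proofs: take the maximal run of key k, group the rest
def pvTakeRun (k : Int) : List (Int × Int × Int) → List (Int × Int × Int) × List (Int × Int × Int)
  | [] => ([], [])
  | x :: xs =>
      if x.2.2 = k then
        let (r, rest) := pvTakeRun k xs
        (x :: r, rest)
      else ([], x :: xs)

theorem pvTakeRun_rest_le (k : Int) (xs : List (Int × Int × Int)) :
    (pvTakeRun k xs).2.length ≤ xs.length := by
  induction xs with
  | nil => simp [pvTakeRun]
  | cons x xs ih =>
      simp only [pvTakeRun]
      split
      · simpa using Nat.le_succ_of_le ih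
      · simp

def pvGroupBy : List (Int × Int × Int) → List (List (Int × Int × Int))
  | [] => []
  | x :: xs =>
      let pr := pvTakeRun x.2.2 xs
      (x :: pr.1) :: pvGroupBy pr.2
termination_by xs => xs.length
decreasing_by
  simpa using Nat.lt_succ_of_le (pvTakeRun_rest_le x.2.2 xs)

theorem takeRun_flatten (k : Int) (xs : List (Int × Int × Int)) :
    (pvTakeRun k xs).1 ++ (pvTakeRun k xs).2 = xs := by
  induction xs with
  | nil => simp [pvTakeRun]
  | cons x xs ih =>
      simp only [pvTakeRun]
      split
      · simpa using ih
      · simp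

theorem takeRun_mem (k : Int) (xs : List (Int × Int × Int)) :
    ∀ a ∈ (pvTakeRun k xs).1, a.2.2 = k := by
  induction xs with
  | nil => simp [pvTakeRun]
  | cons x xs ih =>
      simp only [pvTakeRun]
      split
      · rename_i h
        intro a ha
        rcases List.mem_cons.mp ha with h1 | h2
        · simpa [h1] using h
        · exact ih a h2
      · simp

theorem takeRun_of_all (k : Int) (xs : List (Int × Int × Int))
    (h : ∀ a ∈ xs, a.2.2 = k) : pvTakeRun k xs = (xs, []) := by
  induction xs with
  | nil => simp [pvTakeRun]
  | cons x xs ih =>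
      have hx : x.2.2 = k := h x (by simp)
      have hr := ih (fun a ha => h a (by simp [ha]))
      simp [pvTakeRun, hx, hr]

theorem takeRun_append (k : Int) (xs ys : List (Int × Int × Int)) :
    pvTakeRun k (xs ++ ys) =
      if (pvTakeRun k xs).2 = [] then
        ((pvTakeRun k xs).1 ++ (pvTakeRun k ys).1, (pvTakeRun k ys).2)
      else ((pvTakeRun k xs).1, (pvTakeRun k xs).2 ++ ys) := by
  induction xs with
  | nil => simp [pvTakeRun]
  | cons x xs ih =>
      by_cases hx : x.2.2 = k
      · simp only [List.cons_append, pvTakeRun, if_pos hx]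
        rw [ih]
        split <;> simp
      · simp [pvTakeRun, hx]

theorem groupBy_ne_nil (xs : List (Int × Int × Int)) (h : xs ≠ []) : pvGroupBy xs ≠ [] := by
  cases xs with
  | nil => exact absurd rfl h
  | cons x t => simp [pvGroupBy]

theorem groupBy_const (k : Int) (xs : List (Int × Int × Int)) (hne : xs ≠ [])
    (h : ∀ a ∈ xs, a.2.2 = k) : pvGroupBy xs = [xs] := by
  cases xs with
  | nil => exact absurd rfl hne
  | cons x t =>
      have ht : pvTakeRun x.2.2 t = (t, []) :=
        takeRun_of_all x.2.2 t (fun a ha => by rw [h a (by simp [ha]), h x (by simp)])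
      simp [pvGroupBy, ht]

-- appending a nonempty constant-id run: merge into the last group iff ids match
theorem groupBy_append_const (k : Int) (r : List (Int × Int × Int)) (hr : r ≠ [])
    (hk : ∀ a ∈ r, a.2.2 = k) (zs : List (Int × Int × Int)) (hz : zs ≠ []) :
    pvGroupBy (zs ++ r) =
      if ((pvGroupBy zs).getLast?.getD []).getLast?.map (·.2.2) = some k then
        (pvGroupBy zs).dropLast ++ [((pvGroupBy zs).getLast?.getD []) ++ r]
      else pvGroupBy zs ++ [r] := by
  induction zs using pvGroupBy.induct with
  | case1 => exact absurd rfl hz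
  | case2 z zt pr ih =>
      have hpr : pr = pvTakeRun z.2.2 zt := rfl
      clear_value pr
      subst hpr
      by_cases h2 : (pvTakeRun z.2.2 zt).2 = []
      · have hzt : (pvTakeRun z.2.2 zt).1 = zt := by
          have := takeRun_flatten z.2.2 zt
          rw [h2] at this; simpa using this
        have hall : ∀ a ∈ z :: zt, a.2.2 = z.2.2 := by
          intro a ha
          rcases List.mem_cons.mp ha with h1 | h1
          · rw [h1]
          · exact takeRun_mem z.2.2 zt a (by rw [hzt]; exact h1)
        have hgz : pvGroupBy (z :: zt) = [z :: zt] := groupBy_const z.2.2 _ (by simp) hall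
        obtain ⟨l, hl, hlm⟩ : ∃ l, (z :: zt).getLast? = some l ∧ l ∈ z :: zt := by
          exact ⟨(z :: zt).getLast (by simp), List.getLast?_eq_some_getLast (by simp), List.getLast_mem _⟩
        have hlid : l.2.2 = z.2.2 := hall l hlm
        by_cases hzk : z.2.2 = k
        · have hrr : pvTakeRun z.2.2 r = (r, []) :=
            takeRun_of_all _ _ (fun a ha => by rw [hk a ha, hzk])
          have htr : pvTakeRun z.2.2 (zt ++ r) = (zt ++ r, []) := by
            rw [takeRun_append, if_pos h2, hrr, hzt]
          have hL : pvGroupBy ((z :: zt) ++ r) = [(z :: zt) ++ r] := by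
            simp [pvGroupBy, htr]
          rw [hL, hgz, if_pos (by simp [hl, hlid, hzk])]
          simp
        · have hrne : pvTakeRun z.2.2 r = ([], r) := by
            cases r with
            | nil => exact absurd rfl hr
            | cons a r' =>
                have : a.2.2 = k := hk a (by simp)
                simp [pvTakeRun, this]
                omega
          have htr : pvTakeRun z.2.2 (zt ++ r) = (zt, r) := by
            rw [takeRun_append, if_pos h2, hrne, hzt]; simp
          have hL : pvGroupBy ((z :: zt) ++ r) = (z :: zt) :: [r] := by
            simp only [List.cons_append, pvGroupBy, htr]
            rw [groupBy_const k r hr hk]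
          rw [hL, hgz, if_neg (by simp [hl, hlid]; omega)]
          simp
      · have htr : pvTakeRun z.2.2 (zt ++ r) = ((pvTakeRun z.2.2 zt).1, (pvTakeRun z.2.2 zt).2 ++ r) := by
          rw [takeRun_append, if_neg h2]
        have hgz : pvGroupBy (z :: zt) =
            (z :: (pvTakeRun z.2.2 zt).1) :: pvGroupBy (pvTakeRun z.2.2 zt).2 := by
          simp [pvGroupBy]
        obtain ⟨g, gs, hgs⟩ : ∃ g gs, pvGroupBy (pvTakeRun z.2.2 zt).2 = g :: gs := by
          cases hg : pvGroupBy (pvTakeRun z.2.2 zt).2 with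
          | nil => exact absurd hg (groupBy_ne_nil _ h2)
          | cons g gs => exact ⟨g, gs, rfl⟩
        have hL : pvGroupBy ((z :: zt) ++ r) =
            (z :: (pvTakeRun z.2.2 zt).1) :: pvGroupBy ((pvTakeRun z.2.2 zt).2 ++ r) := by
          simp only [List.cons_append, pvGroupBy, htr]
        rw [hL, ih h2, hgz, hgs]
        split <;> simp_all

-- A's pivot loop equals findIdx?-with-default
theorem pivotA_eq_findIdx (k : Int) (xs : List (Int × Int × Int)) :
    ∀ i : Nat, pvPivotA k xs i =
      match xs.findIdx? (fun e => e.2.2 ≠ k) with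
      | some j => j + i
      | none => 0 := by
  induction xs with
  | nil => intro i; simp [pvPivotA]
  | cons x xs ih =>
      intro i
      by_cases h : x.2.2 = k
      · have hL : pvPivotA k (x :: xs) i = pvPivotA k xs (i + 1) := by
          simp [pvPivotA, h]
        have hix := ih (i + 1)
        rw [hL, List.findIdx?_cons, if_neg (by simp [h])]
        cases hfi : xs.findIdx? (fun e => decide (e.2.2 ≠ k)) with
        | none => rw [hfi] at hix; simpa using hix
        | some j =>
            rw [hfi] at hix
            rw [hix]
            show j + (i + 1) = j + 1 + i
            omega
      · simp [pvPivotA, h, List.findIdx?_cons]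

-- findIdx? of "id differs from k" in terms of the maximal run
theorem findIdx_takeRun (k : Int) (xs : List (Int × Int × Int)) :
    xs.findIdx? (fun e => e.2.2 ≠ k) =
      if (pvTakeRun k xs).2 = [] then none else some (pvTakeRun k xs).1.length := by
  induction xs with
  | nil => simp [pvTakeRun]
  | cons x xs ih =>
      by_cases hx : x.2.2 = k
      · simp only [pvTakeRun, if_pos hx]
        rw [List.findIdx?_cons, if_neg (by simp [hx]), ih]
        split <;> simp
      · simp [pvTakeRun, hx, List.findIdx?_cons]

-- A's state machine in the running state
theorem loopA_some (xs : List (Int × Int × Int)) :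
    ∀ (acc : List (List (Int × Int × Int))) (p : Int) (edges : List (Int × Int × Int)),
      pvLoopA xs acc (some p) edges =
        acc ++ ((edges ++ (pvTakeRun p xs).1) :: pvGroupBy (pvTakeRun p xs).2) := by
  induction xs with
  | nil => intro acc p edges; simp [pvLoopA, pvTakeRun, pvGroupBy]
  | cons x xs ih =>
      intro acc p edges
      by_cases h : p = x.2.2
      · subst h
        simp only [pvLoopA, pvTakeRun]
        rw [ih]
        simp
      · have ht : pvTakeRun p (x :: xs) = ([], x :: xs) := by
          simp [pvTakeRun, if_neg (Ne.symm h)]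
        have hg : pvGroupBy (x :: xs) = (x :: (pvTakeRun x.2.2 xs).1) :: pvGroupBy (pvTakeRun x.2.2 xs).2 := by
          simp [pvGroupBy]
        simp only [pvLoopA, if_neg h]
        rw [ih, ht, hg]
        simp

theorem loopA_eq_groupBy (x : Int × Int × Int) (xs : List (Int × Int × Int)) :
    pvLoopA (x :: xs) [] none [] = pvGroupBy (x :: xs) := by
  simp only [pvLoopA]
  rw [loopA_some]
  simp [pvGroupBy]

-- B's stage-1 loop in the running state: runs = acc ++ [run], run ends with id k
theorem runsLoop_inv (xs : List (Int × Int × Int)) :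
    ∀ (acc : List (List (Int × Int × Int))) (run : List (Int × Int × Int)) (k : Int),
      run.getLast?.map (·.2.2) = some k →
      pvRunsLoop xs (acc ++ [run]) =
        acc ++ ((run ++ (pvTakeRun k xs).1) :: pvGroupBy (pvTakeRun k xs).2) := by
  induction xs with
  | nil =>
      intro acc run k _
      simp [pvRunsLoop, pvTakeRun, pvGroupBy]
  | cons e rest ih =>
      intro acc run k hk
      obtain ⟨le, hle, hlek⟩ : ∃ le, run.getLast? = some le ∧ le.2.2 = k := by
        cases h : run.getLast? with
        | none => rw [h] at hk; simp at hk
        | some le => rw [h] at hk; exact ⟨le, rfl, by simpa using hk⟩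
      simp only [pvRunsLoop, List.getLast?_concat, hle]
      by_cases he : le.2.2 = e.2.2
      · rw [if_pos he, List.dropLast_concat]
        have := ih acc (run ++ [e]) e.2.2 (by simp)
        rw [this]
        have hek : e.2.2 = k := by rw [← he, hlek]
        subst hek
        simp [pvTakeRun, List.append_assoc]
      · rw [if_neg he]
        have := ih (acc ++ [run]) [e] e.2.2 (by simp)
        rw [List.append_assoc] at this ⊢
        rw [this]
        have hkne : e.2.2 ≠ k := fun h => he (by rw [hlek, h])
        have htr : pvTakeRun k (e :: rest) = ([], e :: rest) := by
          simp [pvTakeRun, hkne]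
        rw [htr]
        have hg : pvGroupBy (e :: rest) =
            (e :: (pvTakeRun e.2.2 rest).1) :: pvGroupBy (pvTakeRun e.2.2 rest).2 := by
          simp [pvGroupBy]
        rw [hg]
        simp

theorem runsLoop_eq_groupBy (xs : List (Int × Int × Int)) :
    pvRunsLoop xs [] = pvGroupBy xs := by
  cases xs with
  | nil => simp [pvRunsLoop, pvGroupBy]
  | cons x t =>
      have h0 : pvRunsLoop (x :: t) [] = pvRunsLoop t [[x]] := by
        simp [pvRunsLoop]
      rw [h0]
      have := runsLoop_inv t [] [x] x.2.2 (by simp)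
      simpa [pvGroupBy] using this

-- ===== VERDICT (by name: the statement is the Claim_ definition above) =====
theorem get_neighbor_edges_spec : Claim_equal_get_neighbor_edges := by
  intro xs _ hpre
  unfold Spec_get_neighbor_edges get_neighbor_edges get_neighbor_edges_alt
  cases xs with
  | nil => exact absurd rfl hpre
  | cons x t =>
      simp only [List.getElem?_cons_zero, runsLoop_eq_groupBy]
      have hfi : (x :: t).findIdx? (fun e => e.2.2 ≠ x.2.2) =
          if (pvTakeRun x.2.2 t).2 = [] then none
          else some ((pvTakeRun x.2.2 t).1.length + 1) := by
        have h := findIdx_takeRun x.2.2 (x :: t)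
        have ht : pvTakeRun x.2.2 (x :: t) = (x :: (pvTakeRun x.2.2 t).1, (pvTakeRun x.2.2 t).2) := by
          simp [pvTakeRun]
        rw [ht] at h
        simpa using h
      have hflat := takeRun_flatten x.2.2 t
      have hmem := takeRun_mem x.2.2 t
      have hgxs : pvGroupBy (x :: t) =
          (x :: (pvTakeRun x.2.2 t).1) :: pvGroupBy (pvTakeRun x.2.2 t).2 := by
        simp [pvGroupBy]
      by_cases h2 : (pvTakeRun x.2.2 t).2 = []
      · -- all ids equal: pivot 0, single run
        have hp : pvPivotA x.2.2 (x :: t) 0 = 0 := by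
          rw [pivotA_eq_findIdx, hfi, if_pos h2]
        rw [hp]
        have hrot : PySem.List.slice (x :: t) (some ((0 : Nat) : Int)) none ++
            PySem.List.slice (x :: t) none (some ((0 : Nat) : Int)) = x :: t := by
          rw [PySem.List.slice_from_natCast, PySem.List.slice_to_natCast]
          simp
        rw [hrot, loopA_eq_groupBy, hgxs, h2]
        simp [pvGroupBy]
      · -- pivot = first-run length + 1; run-level rotation with possible merge
        obtain ⟨y, ys, hy⟩ : ∃ y ys, (pvTakeRun x.2.2 t).2 = y :: ys := by
          cases h : (pvTakeRun x.2.2 t).2 with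
          | nil => exact absurd h h2
          | cons y ys => exact ⟨y, ys, rfl⟩
        have hp : pvPivotA x.2.2 (x :: t) 0 = (pvTakeRun x.2.2 t).1.length + 1 := by
          rw [pivotA_eq_findIdx, hfi, if_neg h2]
        rw [hp]
        have hsplit : x :: t = (x :: (pvTakeRun x.2.2 t).1) ++ (pvTakeRun x.2.2 t).2 := by
          rw [List.cons_append, hflat]
        have hlen : (x :: (pvTakeRun x.2.2 t).1).length = (pvTakeRun x.2.2 t).1.length + 1 := by
          simp
        have hrot : PySem.List.slice (x :: t) (some (((pvTakeRun x.2.2 t).1.length + 1 : Nat) : Int)) none ++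
            PySem.List.slice (x :: t) none (some (((pvTakeRun x.2.2 t).1.length + 1 : Nat) : Int)) =
            (pvTakeRun x.2.2 t).2 ++ (x :: (pvTakeRun x.2.2 t).1) := by
          rw [PySem.List.slice_from_natCast, PySem.List.slice_to_natCast]
          rw [hsplit, ← hlen, List.drop_left, List.take_left]
        rw [hrot]
        have hA : pvLoopA ((pvTakeRun x.2.2 t).2 ++ (x :: (pvTakeRun x.2.2 t).1)) [] none [] =
            pvGroupBy ((pvTakeRun x.2.2 t).2 ++ (x :: (pvTakeRun x.2.2 t).1)) := by
          rw [hy]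
          exact loopA_eq_groupBy _ _
        rw [hA]
        rw [groupBy_append_const x.2.2 (x :: (pvTakeRun x.2.2 t).1) (by simp)
          (by intro a ha
              rcases List.mem_cons.mp ha with h1 | h1
              · rw [h1]
              · exact hmem a h1) _ h2]
        obtain ⟨g, gs, hgs⟩ : ∃ g gs, pvGroupBy (pvTakeRun x.2.2 t).2 = g :: gs := by
          cases h : pvGroupBy (pvTakeRun x.2.2 t).2 with
          | nil => exact absurd h (groupBy_ne_nil _ h2)
          | cons g gs => exact ⟨g, gs, rfl⟩
        rw [hgxs, hgs]
        have hgl : ((g :: gs).getLast (by simp)) = ((g :: gs).getLast?.getD []) := by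
          rw [List.getLast?_eq_some_getLast (by simp)]
          rfl
        simp only [hgl, List.head?_cons, Option.map_some]
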